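-- pv_equiv track=rewrite | github.com/ducmanh2/Programming_Assignment | 1_1,1_2,2_1.py | previous_palindrome
-- ===== SOURCE A (Python) =====
-- def previous_palindrome(s):
--     A=['a','b','c','d']
--     n=len(s)
--     def make_pal(left):
--         if n%2 == 0:
--             return left+left[::-1]
--         else:
--             return left+left[:-1][::-1]
--     def decrease(left):
--         left = list(left)
--         i = len(left) - 1
--         while i >= 0:
--             if left[i] != 'a':
--                 left[i] = A[A.index(left[i]) - 1]
--                 break
--             else:
--                 left[i] = 'd'
--                 i -= 1
--         if i < 0:
--             return None
--
--         return ''.join(left)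
--
--     half_len = (n + 1) // 2
--     left = s[:half_len]
--
--     pal = make_pal(left)
--
--     if pal < s:
--         return pal
--     new_left = decrease(left)
--
--     if new_left is None:
--         return "d" * (n-1)
--
--     return make_pal(new_left)
-- ===== SOURCE B (Python) =====
-- def previous_palindrome(s):
--     n = len(s)
--     half = (n + 1) // 2
--     left = s[:half]
--     pal = left + left[::-1][n % 2:]
--     if pal < s:
--         return pal
--     v = 0
--     for c in left:
--         v = v * 4 + (ord(c) - ord('a'))
--     v -= 1
--     if v < 0:
--         return "d" * (n - 1)
--     digits = []
--     for _ in range(half):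
--         digits.append("abcd"[v % 4])
--         v //= 4
--     new_left = ''.join(reversed(digits))
--     return new_left + new_left[::-1][n % 2:]
-- ===== Notes on version B (the rewrite author's own statement) =====
-- stated objective: alternative
-- what changed: A decrements the half-string with a hand-written rightmost-borrow loop over a char list (turning trailing minimal letters into the maximal one and stepping the break character via list.index); B instead decodes the half as a base-4 integer with one Horner fold, subtracts 1, and re-encodes it to a fixed-width base-4 string; Pre_ excludes inputs whose half has a character outside the four-letter alphabet while the mirrored half is not already below s, where A either raises ValueError or decrements only the suffix after the out-of-alphabet character, a corner no one specifies.
-- outside the precondition, e.g. on previous_palindrome('e '): A raises ValueError, B returns 'dd'; on previous_palindrome('d\nc\nd'): A returns 'd\nb\nd', B returns 'dddd'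
import Mathlib
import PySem

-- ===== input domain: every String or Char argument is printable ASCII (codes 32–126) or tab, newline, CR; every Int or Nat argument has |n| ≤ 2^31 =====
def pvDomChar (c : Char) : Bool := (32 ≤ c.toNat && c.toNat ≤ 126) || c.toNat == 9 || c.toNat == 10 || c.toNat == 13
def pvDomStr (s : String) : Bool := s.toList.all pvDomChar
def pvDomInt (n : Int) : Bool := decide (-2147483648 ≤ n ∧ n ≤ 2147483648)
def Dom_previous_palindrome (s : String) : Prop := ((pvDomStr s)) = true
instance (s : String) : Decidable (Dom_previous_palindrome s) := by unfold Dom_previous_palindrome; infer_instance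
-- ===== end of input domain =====

-- B replaces A's hand-written rightmost-borrow decrement loop over the character list by base-4
-- arithmetic: decode the half to an integer, subtract one, re-encode fixed width (objective: alternative).

-- ===== PORT A =====

-- A's `make_pal`
def pvMakePal (n : Nat) (l : List Char) : List Char :=
  if n % 2 == 0 then l ++ l.reverse else l ++ l.dropLast.reverse

-- A's while loop in `decrease`: scan the half from the right, turning trailing 'a's into 'd',
-- then decrement the first non-'a' via A.index; `rev` is the unprocessed part reversed, `acc`
-- the already-processed tail; none = the i < 0 exit (all 'a').
def pvDecreaseGo (acc : List Char) (rev : List Char) : Option (List Char) :=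
  match rev with
  | [] => none
  | c :: rest =>
      if c ≠ 'a' then
        let j := (PySem.List.index? ['a','b','c','d'] c).getD 0
        let c' := (PySem.List.pyGet? ['a','b','c','d'] ((j : Int) - 1)).getD 'a'
        some (rest.reverse ++ c' :: acc)
      else
        pvDecreaseGo ('d' :: acc) rest

-- A's `decrease`
def pvDecrease (l : List Char) : Option (List Char) :=
  pvDecreaseGo [] l.reverse

-- Python's str `<` is code-point lexicographic = `<` on .toList (PYSEM), so the
-- comparison `pal < s` is ported on the char lists.
def previous_palindrome (s : String) : String :=
  let n := s.toList.length
  let half := (n + 1) / 2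
  let left := s.toList.take half
  let pal := pvMakePal n left
  if pal < s.toList then String.ofList pal
  else
    match pvDecrease left with
    | none => String.ofList (List.replicate (n - 1) 'd')
    | some newLeft => String.ofList (pvMakePal n newLeft)

-- ===== PORT B =====

-- B's fixed-width base-4 encoder: `for _ in range(k): digits.append("abcd"[v % 4]); v //= 4`
-- (least-significant digit first; the caller reverses).
def pvB4Digits : Nat → Int → List Char
  | 0, _ => []
  | k + 1, v =>
      (['a','b','c','d'].getD (PySem.Int.mod v 4).toNat 'a') :: pvB4Digits k (PySem.Int.floordiv v 4)

def previous_palindrome_alt (s : String) : String :=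
  let n := s.toList.length
  let half := (n + 1) / 2
  let left := s.toList.take half
  let pal := left ++ left.reverse.drop (n % 2)
  if pal < s.toList then String.ofList pal
  else
    let v := left.foldl (fun a c => a * 4 + ((c.toNat : Int) - 97)) 0 - 1
    if v < 0 then String.ofList (List.replicate (n - 1) 'd')
    else
      let newLeft := (pvB4Digits half v).reverse
      String.ofList (newLeft ++ newLeft.reverse.drop (n % 2))

-- ===== PRECONDITION & SPEC =====
-- Pre_ excludes inputs whose half contains a character outside the function's four-letter
-- alphabet (codes 97..100) while the mirrored half is not already strictly below s: on such
-- out-of-alphabet input A either raises ValueError (list.index) or borrow-decrements only the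
-- suffix after the out-of-alphabet character; neither value is specified for this function,
-- and B does the natural base-4 arithmetic there instead.
def Pre_previous_palindrome (s : String) : Prop :=
  ((s.toList.take ((s.toList.length + 1) / 2)) ++
      (if s.toList.length % 2 == 0
        then (s.toList.take ((s.toList.length + 1) / 2)).reverse
        else (s.toList.take ((s.toList.length + 1) / 2)).dropLast.reverse)) < s.toList
  ∨ ∀ c ∈ s.toList.take ((s.toList.length + 1) / 2), c ∈ (['a','b','c','d'] : List Char)
instance (s : String) : Decidable (Pre_previous_palindrome s) := by
  unfold Pre_previous_palindrome; infer_instance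
def pvWitness_previous_palindrome : String := "abc"

def Spec_previous_palindrome (s : String) (out : String) : Prop := out = previous_palindrome_alt s
instance (s : String) (out : String) : Decidable (Spec_previous_palindrome s out) := by unfold Spec_previous_palindrome; infer_instance

-- ===== CLAIM (what is proved, stated in full; the proofs are below) =====
def Claim_equal_previous_palindrome : Prop := ∀ (s : String), Dom_previous_palindrome s → Pre_previous_palindrome s → Spec_previous_palindrome s (previous_palindrome s)

-- ===== LEMMAS AND PROOFS =====

-- value of a half, least-significant (rightmost) digit first
def pvValR : List Char → Int
  | [] => 0
  | c :: rest => ((c.toNat : Int) - 97) + 4 * pvValR rest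

theorem pvValR_nonneg (l : List Char)
    (h : ∀ c ∈ l, c ∈ (['a','b','c','d'] : List Char)) : 0 ≤ pvValR l := by
  induction l with
  | nil => simp [pvValR]
  | cons c rest ih =>
      have hc : c ∈ (['a','b','c','d'] : List Char) := h c (by simp)
      have hr := ih (fun x hx => h x (List.mem_cons_of_mem _ hx))
      have hd : 0 ≤ (c.toNat : Int) - 97 := by fin_cases hc <;> decide
      show 0 ≤ ((c.toNat : Int) - 97) + 4 * pvValR rest
      omega

theorem pvB4Digits_step (d v : Int) (h0 : 0 ≤ d) (h4 : d < 4) (k : Nat) :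
    pvB4Digits (k + 1) (d + 4 * v) = (['a','b','c','d'].getD d.toNat 'a') :: pvB4Digits k v := by
  have hm : PySem.Int.mod (d + 4 * v) 4 = d := by
    rw [PySem.Int.mod_eq_emod_of_pos (by norm_num)]; omega
  have hd : PySem.Int.floordiv (d + 4 * v) 4 = v := by
    rw [PySem.Int.floordiv_eq_ediv_of_pos (by norm_num)]; omega
  rw [show pvB4Digits (k + 1) (d + 4 * v) =
      (['a','b','c','d'].getD (PySem.Int.mod (d + 4 * v) 4).toNat 'a') ::
        pvB4Digits k (PySem.Int.floordiv (d + 4 * v) 4) from rfl, hm, hd]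

theorem pvB4Digits_val (l : List Char)
    (h : ∀ c ∈ l, c ∈ (['a','b','c','d'] : List Char)) :
    pvB4Digits l.length (pvValR l) = l := by
  induction l with
  | nil => simp [pvB4Digits]
  | cons c rest ih =>
      have hc : c ∈ (['a','b','c','d'] : List Char) := h c (by simp)
      have hrest := fun x hx => h x (List.mem_cons_of_mem _ hx)
      have h0 : 0 ≤ (c.toNat : Int) - 97 := by fin_cases hc <;> decide
      have h4 : (c.toNat : Int) - 97 < 4 := by fin_cases hc <;> decide
      show pvB4Digits (rest.length + 1) (((c.toNat : Int) - 97) + 4 * pvValR rest) = c :: rest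
      rw [pvB4Digits_step _ _ h0 h4, ih hrest]
      congr 1
      fin_cases hc <;> decide

-- the non-'a' case of the loop, one decremented digit d at the break position
theorem pvDecCase (rest acc : List Char) (c c' : Char) (d : Int)
    (hrest : ∀ x ∈ rest, x ∈ (['a','b','c','d'] : List Char))
    (hdval : ((c.toNat : Int) - 97) = d) (h1 : 1 ≤ d) (h4 : d < 4)
    (hc' : (['a','b','c','d'] : List Char).getD (d - 1).toNat 'a' = c') :
    (if pvValR (c :: rest) = 0 then none
      else some ((pvB4Digits (c :: rest).length (pvValR (c :: rest) - 1)).reverse ++ acc))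
      = some (rest.reverse ++ c' :: acc) := by
  have hv : 0 ≤ pvValR rest := pvValR_nonneg rest hrest
  have hval : pvValR (c :: rest) = d + 4 * pvValR rest := by
    show ((c.toNat : Int) - 97) + 4 * pvValR rest = _
    rw [hdval]
  rw [hval, if_neg (by omega), List.length_cons,
      show d + 4 * pvValR rest - 1 = (d - 1) + 4 * pvValR rest from by ring,
      pvB4Digits_step _ _ (by omega) (by omega), pvB4Digits_val rest hrest, hc']
  simp

-- main loop lemma: A's decrement loop computes B's decode-subtract-encode
theorem pvDecreaseGo_eq (rev : List Char) : ∀ acc : List Char,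
    (∀ c ∈ rev, c ∈ (['a','b','c','d'] : List Char)) →
    pvDecreaseGo acc rev =
      if pvValR rev = 0 then none
      else some ((pvB4Digits rev.length (pvValR rev - 1)).reverse ++ acc) := by
  induction rev with
  | nil => intro acc h; simp [pvDecreaseGo, pvValR]
  | cons c rest ih =>
      intro acc h
      have hc : c ∈ (['a','b','c','d'] : List Char) := h c (by simp)
      have hrest := fun x hx => h x (List.mem_cons_of_mem _ hx)
      have hv : 0 ≤ pvValR rest := pvValR_nonneg rest hrest
      by_cases hca : c = 'a'
      · subst hca
        have hstep : pvDecreaseGo acc ('a' :: rest) = pvDecreaseGo ('d' :: acc) rest := by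
          simp [pvDecreaseGo]
        have hval : pvValR ('a' :: rest) = 4 * pvValR rest := by
          show (((97 : Nat) : Int) - 97) + 4 * pvValR rest = 4 * pvValR rest
          norm_num
        rw [hstep, ih _ hrest, hval]
        by_cases h0 : pvValR rest = 0
        · simp [h0]
        · have h1 : ¬ (4 * pvValR rest = 0) := by omega
          rw [if_neg h0, if_neg h1]
          have h3 : 4 * pvValR rest - 1 = 3 + 4 * (pvValR rest - 1) := by ring
          rw [List.length_cons, h3, pvB4Digits_step 3 _ (by norm_num) (by norm_num)]
          simp
      · have hstep : pvDecreaseGo acc (c :: rest) =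
            some (rest.reverse ++
              ((PySem.List.pyGet? ['a','b','c','d']
                (((PySem.List.index? ['a','b','c','d'] c).getD 0 : Int) - 1)).getD 'a') :: acc) := by
          simp [pvDecreaseGo, hca]
        rw [hstep]
        fin_cases hc
        · exact absurd rfl hca
        · rw [show (PySem.List.pyGet? ['a','b','c','d']
              (((PySem.List.index? ['a','b','c','d'] 'b').getD 0 : Int) - 1)).getD 'a' = 'a' from by decide]
          exact (pvDecCase rest acc 'b' 'a' 1 hrest (by decide) (by norm_num) (by norm_num) (by decide)).symm
        · rw [show (PySem.List.pyGet? ['a','b','c','d']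
              (((PySem.List.index? ['a','b','c','d'] 'c').getD 0 : Int) - 1)).getD 'a' = 'b' from by decide]
          exact (pvDecCase rest acc 'c' 'b' 2 hrest (by decide) (by norm_num) (by norm_num) (by decide)).symm
        · rw [show (PySem.List.pyGet? ['a','b','c','d']
              (((PySem.List.index? ['a','b','c','d'] 'd').getD 0 : Int) - 1)).getD 'a' = 'c' from by decide]
          exact (pvDecCase rest acc 'd' 'c' 3 hrest (by decide) (by norm_num) (by norm_num) (by decide)).symm

theorem pvValR_append (xs : List Char) (c : Char) :
    pvValR (xs ++ [c]) = pvValR xs + ((c.toNat : Int) - 97) * 4 ^ xs.length := by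
  induction xs with
  | nil => show ((c.toNat : Int) - 97) + 4 * 0 = 0 + ((c.toNat : Int) - 97) * 4 ^ 0; ring
  | cons x rest ih =>
      show ((x.toNat : Int) - 97) + 4 * pvValR (rest ++ [c]) = _
      rw [ih]
      show _ = (((x.toNat : Int) - 97) + 4 * pvValR rest) + ((c.toNat : Int) - 97) * 4 ^ (rest.length + 1)
      ring

theorem pvFoldl_valR (l : List Char) : ∀ a : Int,
    l.foldl (fun a c => a * 4 + ((c.toNat : Int) - 97)) a
      = a * 4 ^ l.length + pvValR l.reverse := by
  induction l with
  | nil => intro a; simp [pvValR]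
  | cons c rest ih =>
      intro a
      rw [List.foldl_cons, ih, List.reverse_cons, pvValR_append]
      rw [List.length_cons, List.length_reverse]
      ring

theorem pvMakePal_eq (n : Nat) (l : List Char) :
    pvMakePal n l = l ++ l.reverse.drop (n % 2) := by
  unfold pvMakePal
  rcases Nat.mod_two_eq_zero_or_one n with h | h <;> simp [h]

-- ===== VERDICT (by name: the statement is the Claim_ definition above) =====
theorem previous_palindrome_spec : Claim_equal_previous_palindrome := by
  intro s _ hpre
  show previous_palindrome s = previous_palindrome_alt s
  have hA : previous_palindrome s =
      (if pvMakePal s.toList.length (s.toList.take ((s.toList.length + 1) / 2)) < s.toList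
        then String.ofList (pvMakePal s.toList.length (s.toList.take ((s.toList.length + 1) / 2)))
        else
          match pvDecrease (s.toList.take ((s.toList.length + 1) / 2)) with
          | none => String.ofList (List.replicate (s.toList.length - 1) 'd')
          | some newLeft => String.ofList (pvMakePal s.toList.length newLeft)) := rfl
  have hB : previous_palindrome_alt s =
      (if (s.toList.take ((s.toList.length + 1) / 2)) ++
            (s.toList.take ((s.toList.length + 1) / 2)).reverse.drop (s.toList.length % 2)
            < s.toList
        then String.ofList ((s.toList.take ((s.toList.length + 1) / 2)) ++
            (s.toList.take ((s.toList.length + 1) / 2)).reverse.drop (s.toList.length % 2))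
        else
          if (s.toList.take ((s.toList.length + 1) / 2)).foldl
              (fun a c => a * 4 + ((c.toNat : Int) - 97)) 0 - 1 < 0
          then String.ofList (List.replicate (s.toList.length - 1) 'd')
          else String.ofList
            ((pvB4Digits ((s.toList.length + 1) / 2)
                ((s.toList.take ((s.toList.length + 1) / 2)).foldl
                  (fun a c => a * 4 + ((c.toNat : Int) - 97)) 0 - 1)).reverse ++
              (pvB4Digits ((s.toList.length + 1) / 2)
                ((s.toList.take ((s.toList.length + 1) / 2)).foldl
                  (fun a c => a * 4 + ((c.toNat : Int) - 97)) 0 - 1)).reverse.reverse.drop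
                (s.toList.length % 2))) := rfl
  rw [hA, hB]
  set n := s.toList.length with hn
  set L := s.toList.take ((n + 1) / 2) with hL
  rw [pvMakePal_eq]
  by_cases hlt : L ++ L.reverse.drop (n % 2) < s.toList
  · rw [if_pos hlt, if_pos hlt]
  · rw [if_neg hlt, if_neg hlt]
    have hall : ∀ c ∈ L, c ∈ (['a','b','c','d'] : List Char) := by
      rcases hpre with hp | hp
      · exfalso; apply hlt
        have hsame : (if n % 2 == 0 then L.reverse else L.dropLast.reverse)
            = L.reverse.drop (n % 2) := by
          rcases Nat.mod_two_eq_zero_or_one n with h | h <;> simp [h]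
        rw [← hsame]
        exact hp
      · exact hp
    have hrev : ∀ c ∈ L.reverse, c ∈ (['a','b','c','d'] : List Char) :=
      fun c hc => hall c (List.mem_reverse.mp hc)
    have hVnn : 0 ≤ pvValR L.reverse := pvValR_nonneg _ hrev
    have hfold : L.foldl (fun a c => a * 4 + ((c.toNat : Int) - 97)) 0
        = pvValR L.reverse := by rw [pvFoldl_valR]; simp
    have hlen : L.reverse.length = (n + 1) / 2 := by
      rw [List.length_reverse, hL, List.length_take, hn]
      omega
    rw [pvDecrease, pvDecreaseGo_eq _ _ hrev, hfold]
    by_cases h0 : pvValR L.reverse = 0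
    · rw [if_pos h0, h0]
      norm_num
    · rw [if_neg h0, if_neg (by omega : ¬ (pvValR L.reverse - 1 < 0))]
      simp only [List.append_nil, hlen, pvMakePal_eq, List.reverse_reverse]
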